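-- pv_equiv track=rewrite | github.com/egwilborn/python-practice | python-daily-coding.py | flick_switch
-- ===== SOURCE A (Python) =====
-- def flick_switch(lst):
--     state = 1
--     result = []
--     for item in lst:
--         if (item == "flick"):
--             state = state*-1
--         if (state > 0):
--             result.append(True)
--         elif (state < 0):
--             result.append(False)
--     return result
-- ===== SOURCE B (Python) =====
-- def flick_switch(lst):
--     # Divide and conquer on the first "flick": everything before it is True,
--     # the flick itself flips to False, and the tail's answer is the negation
--     # of the subproblem's answer.
--     if "flick" in lst:
--         k = lst.index("flick")
--         return [True] * k + [False] + [not b for b in flick_switch(lst[k + 1:])]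
--     return [True] * len(lst)
-- ===== Notes on version B (the rewrite author's own statement) =====
-- stated objective: alternative
-- what changed: Replaces the single mutating-state scan with divide-and-conquer on the first 'flick' occurrence: emit a True-run up to it, a False for the flick, and the pointwise negation of the recursive answer for the tail.
import Mathlib
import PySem

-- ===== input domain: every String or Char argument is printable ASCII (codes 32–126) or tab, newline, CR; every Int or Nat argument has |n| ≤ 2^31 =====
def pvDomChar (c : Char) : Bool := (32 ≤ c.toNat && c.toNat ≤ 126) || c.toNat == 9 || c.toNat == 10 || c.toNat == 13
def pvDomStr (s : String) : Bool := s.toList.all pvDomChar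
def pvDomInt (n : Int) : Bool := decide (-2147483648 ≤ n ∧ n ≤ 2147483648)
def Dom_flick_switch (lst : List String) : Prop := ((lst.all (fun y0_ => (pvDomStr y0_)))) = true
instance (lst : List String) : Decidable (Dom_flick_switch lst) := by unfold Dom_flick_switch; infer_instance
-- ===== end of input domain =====

-- B replaces A's single mutating-state scan with divide-and-conquer on the first "flick"
-- (True-run, then False, then the negated recursive answer); same values everywhere.
-- ===== PORT A =====
-- loop of A: state flips on "flick", each item appends True/False by the sign of state
def fsLoopA : List String → Int → List Bool
  | [], _ => []
  | item :: rest, state =>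
    let state' := if item == "flick" then state * -1 else state
    (if state' > 0 then [true] else if state' < 0 then [false] else []) ++ fsLoopA rest state'

def flick_switch (lst : List String) : List Bool := fsLoopA lst 1

-- ===== PORT B =====
-- recursion of B: split at the first "flick", negate the tail's answer
-- the Python 'if "flick" in lst: k = lst.index("flick")' pair is one index? lookup here
def flick_switch_alt (lst : List String) : List Bool :=
  match hk : PySem.List.index? lst "flick" with
  | some k =>
    List.replicate k true ++ [false] ++
      (flick_switch_alt (lst.drop (k + 1))).map (fun b => !b)
  | none => List.replicate lst.length true
termination_by lst.length
decreasing_by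
  have h1 : k < lst.length := (PySem.List.getElem_of_index?_eq_some hk).1
  simp [List.length_drop]; omega

-- ===== PRECONDITION & SPEC =====
def Spec_flick_switch (lst : List String) (out : List Bool) : Prop := out = flick_switch_alt lst
instance (lst : List String) (out : List Bool) : Decidable (Spec_flick_switch lst out) := by unfold Spec_flick_switch; infer_instance

-- ===== CLAIM =====
def Claim_equal_flick_switch : Prop := ∀ (lst : List String), Dom_flick_switch lst → Spec_flick_switch lst (flick_switch lst)

-- ===== LEMMAS AND PROOFS =====
theorem alt_of_some {lst : List String} {k : Nat}
    (hk : PySem.List.index? lst "flick" = some k) :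
    flick_switch_alt lst = List.replicate k true ++ [false] ++
      (flick_switch_alt (lst.drop (k + 1))).map (fun b => !b) := by
  rw [flick_switch_alt]
  split
  · next k' hk' => rw [hk] at hk'; cases hk'; rfl
  · next hk' => rw [hk] at hk'; cases hk'

theorem alt_of_none {lst : List String}
    (hk : PySem.List.index? lst "flick" = none) :
    flick_switch_alt lst = List.replicate lst.length true := by
  rw [flick_switch_alt]
  split
  · next k' hk' => rw [hk] at hk'; cases hk'
  · rfl

-- On a flick-free segment the state is untouched and, from state 1, all outputs are true.
theorem fsLoopA_no_flick (xs : List String) (hx : "flick" ∉ xs) :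
    fsLoopA xs 1 = List.replicate xs.length true := by
  induction xs with
  | nil => simp [fsLoopA]
  | cons x rest ih =>
    have hxne : (x == "flick") = false := by
      simp; rintro rfl; exact hx (List.mem_cons_self)
    simp [fsLoopA, hxne, ih (fun hm => hx (List.mem_cons_of_mem _ hm)), List.replicate_succ]

-- Starting A from -1 negates every emitted value.
theorem fsLoopA_neg (xs : List String) :
    fsLoopA xs (-1) = (fsLoopA xs 1).map (fun b => !b) := by
  induction xs with
  | nil => simp [fsLoopA]
  | cons x rest ih =>
    by_cases hx : (x == "flick") = true
    · have : fsLoopA rest (-1) = (fsLoopA rest 1).map (fun b => !b) := ih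
      have h2 : fsLoopA rest 1 = (fsLoopA rest (-1)).map (fun b => !b) := by
        simp [this, Function.comp_def]
      simp [fsLoopA, hx, h2]
    · simp at hx
      simp [fsLoopA, hx, ih]

theorem flick_switch_eq_alt (lst : List String) : flick_switch lst = flick_switch_alt lst := by
  induction lst using (fun motive ih l => Nat.strongRecOn (motive := fun n => ∀ l : List String, l.length = n → motive l)
      l.length (fun n ihn l hl => ih l (fun m hm => ihn m.length (hl ▸ hm) m rfl)) l rfl :
      ∀ motive : List String → Prop,
        (∀ l : List String, (∀ m : List String, m.length < l.length → motive m) → motive l) →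
        ∀ l, motive l) with
  | _ lst ih =>
  by_cases h : "flick" ∈ lst
  · obtain ⟨k, hk⟩ := Option.isSome_iff_exists.mp ((PySem.List.index?_isSome_iff lst "flick").mpr h)
    obtain ⟨pre, suf, hsplit, hlen, hpre⟩ := (PySem.List.index?_eq_some_iff lst "flick" k).mp hk
    have hdrop : lst.drop (k + 1) = suf := by
      subst hsplit hlen
      simp
    have ihsuf : flick_switch suf = flick_switch_alt suf := by
      apply ih
      subst hsplit; simp; omega
    rw [alt_of_some hk, hdrop]
    unfold flick_switch
    subst hsplit
    -- the state after a flick-free prefix from 1 is 1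
    have hstate : ∀ xs : List String, "flick" ∉ xs → ∀ ys : List String,
        fsLoopA (xs ++ ys) 1 = fsLoopA xs 1 ++ fsLoopA ys 1 := by
      intro xs hxs
      induction xs with
      | nil => intro ys; simp [fsLoopA]
      | cons x rest ihr =>
        intro ys
        have hxne : (x == "flick") = false := by
          simp; rintro rfl; exact hxs (List.mem_cons_self)
        simp [fsLoopA, hxne, ihr (fun hm => hxs (List.mem_cons_of_mem _ hm))]
    rw [hstate pre hpre ("flick" :: suf)]
    rw [fsLoopA_no_flick pre hpre, hlen]
    have : fsLoopA ("flick" :: suf) 1 = false :: (fsLoopA suf 1).map (fun b => !b) := by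
      simp [fsLoopA, fsLoopA_neg]
    rw [this]
    have : fsLoopA suf 1 = flick_switch_alt suf := ihsuf
    rw [this]
    simp
  · rw [alt_of_none ((PySem.List.index?_eq_none_iff lst "flick").mpr h)]
    exact fsLoopA_no_flick lst h

-- ===== VERDICT =====
theorem flick_switch_spec : Claim_equal_flick_switch := by
  intro lst _
  exact flick_switch_eq_alt lst
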